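-- pv_equiv track=rewrite | github.com/punki/hackerrank | equal.py | add_chocolate
-- ===== SOURCE A (Python) =====
-- def add_chocolate(element, number):
--     new_es = []
--     for i in range(len(element)):
--         left = [x + number for x in element[:i]]
--         center = element[i]
--         right = [x + number for x in element[i + 1:]]
--         t_array = []
--         t_array.extend(left)
--         t_array.append(center)
--         t_array.extend(right)
--         new_es.append(tuple(t_array))
--     return new_es
-- ===== SOURCE B (Python) =====
-- def add_chocolate(element, number):
--     added = [x + number for x in element]
--     result = []
--     for i in range(len(element)):
--         row = added.copy()
--         row[i] = element[i]
--         result.append(tuple(row))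
--     return result
-- ===== Notes on version B (the rewrite author's own statement) =====
-- stated objective: simpler
-- what changed: B precomputes the fully-incremented vector once and builds each row by copying it and overwriting one position, instead of A's per-row left/right slice comprehensions.
import Mathlib
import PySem

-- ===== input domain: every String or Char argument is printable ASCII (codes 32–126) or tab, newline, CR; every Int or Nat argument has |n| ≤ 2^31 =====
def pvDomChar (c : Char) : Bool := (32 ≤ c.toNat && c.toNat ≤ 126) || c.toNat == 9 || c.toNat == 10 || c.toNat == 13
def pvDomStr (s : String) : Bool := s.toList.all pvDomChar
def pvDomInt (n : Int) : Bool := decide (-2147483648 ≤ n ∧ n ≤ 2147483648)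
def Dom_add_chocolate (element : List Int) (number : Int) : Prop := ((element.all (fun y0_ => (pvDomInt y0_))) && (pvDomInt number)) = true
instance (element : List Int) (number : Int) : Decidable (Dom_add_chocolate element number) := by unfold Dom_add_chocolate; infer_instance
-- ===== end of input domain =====

-- ===== PORT A =====
-- Per-row slice comprehensions: left ++ [center] ++ right, as in A.
def add_chocolate (element : List Int) (number : Int) : List (List Int) :=
  (List.range element.length).map (fun i =>
    ((element.take i).map (fun x => x + number))
      ++ [element.getD i 0]
      ++ ((element.drop (i + 1)).map (fun x => x + number)))

-- ===== PORT B =====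
-- B: precompute the incremented vector once, then patch one position per row.
def add_chocolate_alt (element : List Int) (number : Int) : List (List Int) :=
  let added := element.map (fun x => x + number)
  (List.range element.length).map (fun i => added.set i (element.getD i 0))

-- ===== PRECONDITION & SPEC =====
def Spec_add_chocolate (element : List Int) (number : Int) (out : List (List Int)) : Prop := out = add_chocolate_alt element number
instance (element : List Int) (number : Int) (out : List (List Int)) : Decidable (Spec_add_chocolate element number out) := by unfold Spec_add_chocolate; infer_instance

-- ===== CLAIM (what is proved, stated in full; the proofs are below) =====
def Claim_equal_add_chocolate : Prop := ∀ (element : List Int) (number : Int), Dom_add_chocolate element number → Spec_add_chocolate element number (add_chocolate element number)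

-- ===== LEMMAS AND PROOFS =====

-- ===== VERDICT (by name: the statement is the Claim_ definition above) =====
theorem add_chocolate_spec : Claim_equal_add_chocolate := by
  intro element number _
  unfold Spec_add_chocolate add_chocolate add_chocolate_alt
  apply List.map_congr_left
  intro i hi
  rw [List.mem_range] at hi
  have hi' : i < (element.map (fun x => x + number)).length := by
    simpa using hi
  rw [List.set_eq_take_append_cons_drop, if_pos hi', List.map_take, List.map_drop]
  simp
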